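-- pv_equiv track=rewrite | github.com/NNChawla/SkillsTransferPrediction | score_prediction_experiments.py | generate_metadata_combinations
-- ===== SOURCE A (Python) =====
-- from itertools import product, combinations
--
-- def generate_metadata_combinations(metadata_fields, required_fields, combo_sizes):
--     """Generate combinations of metadata fields, always including required fields"""
--     if not metadata_fields:
--         return {'none': []}
--
--     # Ensure required fields exist in metadata_fields
--     required_fields = [f for f in required_fields if f in metadata_fields]
--
--     # If there are required fields, don't include 'none' option
--     metadata_sets = {} if required_fields else {'none': []}
--
--     if not required_fields:
--         # If no required fields, generate regular combinations
--         for size in combo_sizes: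
--             if size <= len(metadata_fields):
--                 for combo in combinations(metadata_fields, size):
--                     key_name = '_'.join(field.lower() for field in combo)
--                     if len(combo) == len(metadata_fields):
--                         key_name = 'all'
--                     metadata_sets[key_name] = list(combo)
--         return metadata_sets
--
--     # Get remaining fields
--     remaining_fields = [f for f in metadata_fields if f not in required_fields]
--
--     # For each combination size
--     for size in combo_sizes:
--         if size < len(required_fields):
--             continue  # Skip if size is smaller than number of required fields
--
--         # Calculate how many additional fields we need
--         additional_needed = size - len(required_fields)
--
--         # Generate combinations of remaining fields
--         if additional_needed > 0 and remaining_fields: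
--             for combo in combinations(remaining_fields, additional_needed):
--                 # Combine with required fields
--                 full_combo = list(required_fields) + list(combo)
--                 key_name = '_'.join(field.lower() for field in full_combo)
--                 if len(full_combo) == len(metadata_fields):
--                     key_name = 'all'
--                 metadata_sets[key_name] = full_combo
--         elif additional_needed == 0:
--             # If size exactly matches required fields, add just those
--             key_name = '_'.join(field.lower() for field in required_fields)
--             if len(required_fields) == len(metadata_fields):
--                 key_name = 'all'
--             metadata_sets[key_name] = list(required_fields)
--
--     return metadata_sets
-- ===== SOURCE B (Python) =====
-- def generate_metadata_combinations(metadata_fields, required_fields, combo_sizes):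
--     """Pascal-style DP: one pass over the optional fields builds a table of all
--     combinations of every size at once; each requested size is then a table lookup."""
--     if not metadata_fields:
--         return {'none': []}
--     required = [f for f in required_fields if f in metadata_fields]
--     remaining = [f for f in metadata_fields if f not in required]
--     # table[k] = all size-k combinations of remaining, in lexicographic order
--     table = [[[]]]
--     for x in reversed(remaining):
--         new = [table[0]]
--         for k in range(1, len(table)):
--             new.append([[x] + c for c in table[k - 1]] + table[k])
--         new.append([[x] + c for c in table[-1]])
--         table = new
--     result = {} if required else {'none': []}
--     for size in combo_sizes:
--         k = size - len(required)
--         if k < 0 or k >= len(table):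
--             continue
--         for combo in table[k]:
--             full = required + combo
--             if len(full) == len(metadata_fields):
--                 key = 'all'
--             else:
--                 key = '_'.join(f.lower() for f in full)
--             result[key] = full
--     return result
-- ===== Notes on version B (the rewrite author's own statement) =====
-- stated objective: alternative
-- what changed: Replaces A's per-size calls to itertools.combinations (plus its separate no-required branch and additional==0/empty-remaining sub-branches) by a Pascal-style dynamic-programming table built in a single reversed pass over the optional fields -- table[k] holds all size-k combinations in lexicographic order -- so each requested size becomes a bounds-checked table lookup feeding one uniform key-building loop.
import Mathlib
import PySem

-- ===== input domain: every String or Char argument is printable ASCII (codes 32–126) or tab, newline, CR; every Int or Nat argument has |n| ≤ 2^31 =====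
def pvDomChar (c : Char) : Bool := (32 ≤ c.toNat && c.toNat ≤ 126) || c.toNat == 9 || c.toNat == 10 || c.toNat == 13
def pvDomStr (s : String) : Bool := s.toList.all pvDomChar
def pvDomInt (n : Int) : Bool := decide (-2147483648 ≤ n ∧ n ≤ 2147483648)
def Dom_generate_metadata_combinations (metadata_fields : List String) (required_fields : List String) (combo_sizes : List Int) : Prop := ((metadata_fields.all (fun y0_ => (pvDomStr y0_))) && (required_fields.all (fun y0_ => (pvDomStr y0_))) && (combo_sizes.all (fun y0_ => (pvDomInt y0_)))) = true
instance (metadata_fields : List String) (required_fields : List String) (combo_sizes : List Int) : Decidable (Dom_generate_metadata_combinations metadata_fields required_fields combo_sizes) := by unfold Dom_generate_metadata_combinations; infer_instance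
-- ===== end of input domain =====

-- B replaces A's per-size itertools.combinations enumeration by a Pascal-style DP table
-- built in one pass over the optional fields, answered per size by table lookup
-- (objective: alternative). Outside Pre_ (negative size with no required fields) A raises
-- ValueError while B simply skips that size.


-- ===== PORT A =====
def generate_metadata_combinations (metadata_fields : List String) (required_fields : List String) (combo_sizes : List Int) : List (String × List String) :=
  if metadata_fields = [] then [("none", [])]
  else
    -- required_fields = [f for f in required_fields if f in metadata_fields]
    let required_fields := required_fields.filter (fun f => decide (f ∈ metadata_fields))
    if required_fields = [] then
      -- no-required branch: regular combinations of metadata_fields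
      (combo_sizes.foldl (fun d size =>
        if size ≤ PySem.List.len metadata_fields then
          (PySem.List.combinations metadata_fields size.toNat).foldl (fun d combo =>
            let key_name := PySem.Str.join "_" (combo.map PySem.Str.lower)
            let key_name := if combo.length = metadata_fields.length then "all" else key_name
            d.insert key_name combo) d
        else d) (PySem.Dict.ofList [("none", [])])).items
    else
      let remaining_fields := metadata_fields.filter (fun f => decide (f ∉ required_fields))
      (combo_sizes.foldl (fun d size =>
        if size < PySem.List.len required_fields then d
        else
          let additional_needed := size - PySem.List.len required_fields
          if 0 < additional_needed ∧ remaining_fields ≠ [] then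
            (PySem.List.combinations remaining_fields additional_needed.toNat).foldl (fun d combo =>
              let full_combo := required_fields ++ combo
              let key_name := PySem.Str.join "_" (full_combo.map PySem.Str.lower)
              let key_name := if full_combo.length = metadata_fields.length then "all" else key_name
              d.insert key_name full_combo) d
          else if additional_needed = 0 then
            let key_name := PySem.Str.join "_" (required_fields.map PySem.Str.lower)
            let key_name := if required_fields.length = metadata_fields.length then "all" else key_name
            d.insert key_name required_fields
          else d) (PySem.Dict.empty : PySem.Dict String (List String))).items

-- ===== PORT B =====
-- inner 'for k in range(1, len(table))' body plus the final append: walks the old table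
-- carrying the previous level, producing new[k] = [[x]+c for c in table[k-1]] + table[k]
def pvDpAux (x : String) (prev : List (List String)) : List (List (List String)) → List (List (List String))
  | [] => [prev.map (fun c => x :: c)]
  | cur :: rest => (prev.map (fun c => x :: c) ++ cur) :: pvDpAux x cur rest

-- one iteration of 'for x in reversed(remaining)'
def pvDpStep (x : String) : List (List (List String)) → List (List (List String))
  | [] => []
  | t0 :: rest => t0 :: pvDpAux x t0 rest

def generate_metadata_combinations_alt (metadata_fields : List String) (required_fields : List String) (combo_sizes : List Int) : List (String × List String) :=
  if metadata_fields = [] then [("none", [])]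
  else
    let required := required_fields.filter (fun f => decide (f ∈ metadata_fields))
    let remaining := metadata_fields.filter (fun f => decide (f ∉ required))
    -- 'for x in reversed(remaining)' with accumulator table = foldr
    let table := remaining.foldr pvDpStep [[[]]]
    let init : PySem.Dict String (List String) :=
      if required = [] then PySem.Dict.ofList [("none", [])] else PySem.Dict.empty
    (combo_sizes.foldl (fun d size =>
      let k := size - PySem.List.len required
      if k < 0 ∨ k ≥ PySem.List.len table then d
      else (table.getD k.toNat []).foldl (fun d combo =>
        let full := required ++ combo
        let key := if full.length = metadata_fields.length then "all"
                   else PySem.Str.join "_" (full.map PySem.Str.lower)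
        d.insert key full) d) init).items

-- ===== PRECONDITION & SPEC =====
-- Pre_ excludes exactly the inputs where A raises ValueError: metadata_fields nonempty, no
-- required field present in metadata_fields, and a negative size in combo_sizes.
def Pre_generate_metadata_combinations (metadata_fields : List String) (required_fields : List String) (combo_sizes : List Int) : Prop :=
  metadata_fields = [] ∨ required_fields.filter (fun f => decide (f ∈ metadata_fields)) ≠ [] ∨ ∀ s ∈ combo_sizes, 0 ≤ s
instance (metadata_fields : List String) (required_fields : List String) (combo_sizes : List Int) : Decidable (Pre_generate_metadata_combinations metadata_fields required_fields combo_sizes) := by unfold Pre_generate_metadata_combinations; infer_instance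
def pvWitness_generate_metadata_combinations : List String × List String × List Int := (["Age", "Gender"], ["Age"], [1, 2])

def Spec_generate_metadata_combinations (metadata_fields : List String) (required_fields : List String) (combo_sizes : List Int) (out : List (String × List String)) : Prop := out = generate_metadata_combinations_alt metadata_fields required_fields combo_sizes
instance (metadata_fields : List String) (required_fields : List String) (combo_sizes : List Int) (out : List (String × List String)) : Decidable (Spec_generate_metadata_combinations metadata_fields required_fields combo_sizes out) := by unfold Spec_generate_metadata_combinations; infer_instance

-- ===== CLAIM =====
def Claim_equal_generate_metadata_combinations : Prop := ∀ (metadata_fields : List String) (required_fields : List String) (combo_sizes : List Int), Dom_generate_metadata_combinations metadata_fields required_fields combo_sizes → Pre_generate_metadata_combinations metadata_fields required_fields combo_sizes → Spec_generate_metadata_combinations metadata_fields required_fields combo_sizes (generate_metadata_combinations metadata_fields required_fields combo_sizes)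

-- ===== LEMMAS AND PROOFS =====

-- pvDpAux turns the tail [comb xs (j+1), …, comb xs (j+m)] of the table for xs (with
-- prev = comb xs j and j+m = xs.length) into [comb (x::xs) (j+1), …, comb (x::xs) (j+m+1)]
theorem pvDpAux_comb (x : String) (xs : List String) :
    ∀ (m j : Nat), j + m = xs.length →
      pvDpAux x (PySem.List.combinations xs j)
        ((List.range' (j+1) m).map (PySem.List.combinations xs)) =
      (List.range' (j+1) (m+1)).map (PySem.List.combinations (x :: xs)) := by
  intro m
  induction m with
  | zero =>
    intro j hj
    obtain rfl : j = xs.length := by omega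
    simp only [List.range', List.map_nil, List.map_cons, pvDpAux]
    rw [PySem.List.combinations_cons_succ,
      PySem.List.combinations_eq_nil_of_length_lt xs (Nat.lt_succ_self xs.length)]
    simp
  | succ m ih =>
    intro j hj
    rw [List.range'_succ, List.range'_succ, List.range'_succ, List.map_cons, List.map_cons,
      List.map_cons, pvDpAux, ih (j+1) (by omega), List.range'_succ, List.map_cons,
      ← PySem.List.combinations_cons_succ]

theorem pvTable_spec (xs : List String) :
    xs.foldr pvDpStep [[[]]] =
      (List.range (xs.length + 1)).map (PySem.List.combinations xs) := by
  induction xs with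
  | nil => simp [PySem.List.combinations_zero]
  | cons x xs ih =>
    rw [List.foldr_cons, ih, List.range_eq_range']
    simp only [List.range', List.map_cons, pvDpStep]
    rw [pvDpAux_comb x xs xs.length 0 (by omega), List.length_cons,
      List.range_eq_range']
    simp only [List.range', List.map_cons]
    rw [PySem.List.combinations_zero, PySem.List.combinations_zero]

theorem pvTable_len (xs : List String) :
    (xs.foldr pvDpStep [[[]]]).length = xs.length + 1 := by
  rw [pvTable_spec]; simp

theorem pvTable_getD (xs : List String) (k : Nat) (hk : k ≤ xs.length) :
    (xs.foldr pvDpStep [[[]]]).getD k [] = PySem.List.combinations xs k := by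
  rw [pvTable_spec, List.getD_eq_getElem?_getD, List.getElem?_map,
    List.getElem?_range (by omega)]
  rfl

-- ===== VERDICT =====
theorem generate_metadata_combinations_spec : Claim_equal_generate_metadata_combinations := by
  intro m rf cs _hdom hpre
  unfold Spec_generate_metadata_combinations generate_metadata_combinations generate_metadata_combinations_alt
  by_cases hm : m = []
  · simp [hm]
  · simp only [if_neg hm]
    by_cases hreq : rf.filter (fun f => decide (f ∈ m)) = []
    · -- no required fields
      have h0 : ∀ s ∈ cs, 0 ≤ s := by
        rcases hpre with h | h | h
        · exact absurd h hm
        · exact absurd hreq h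
        · exact h
      have hrem : m.filter (fun f => decide (f ∉ ([] : List String))) = m := by simp
      simp only [hreq, reduceIte, hrem]
      congr 1
      refine PySem.List.foldl_congr_mem _ _ _ _ (fun d s hs => ?_)
      have hs0 : 0 ≤ s := h0 s hs
      simp only [PySem.List.len_eq, List.length_nil, Int.natCast_zero, Int.sub_zero,
        pvTable_len]
      by_cases hle : s ≤ (m.length : Int)
      · rw [if_pos hle,
          if_neg (by push_cast; omega : ¬ (s < 0 ∨ s ≥ ((m.length + 1 : Nat) : Int))),
          pvTable_getD m s.toNat (by omega)]
        simp only [List.nil_append]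
      · rw [if_neg hle, if_pos (Or.inr (by push_cast; omega))]
    · -- required fields present
      simp only [hreq, reduceIte]
      congr 1
      refine PySem.List.foldl_congr_mem _ _ _ _ (fun d s _ => ?_)
      simp only [PySem.List.len_eq, pvTable_len]
      set q := rf.filter (fun f => decide (f ∈ m)) with hq
      set rem := m.filter (fun f => decide (f ∉ q)) with hremdef
      by_cases hlt : s < (q.length : Int)
      · rw [if_pos hlt, if_pos (Or.inl (by omega))]
      · by_cases hskip : s - (q.length : Int) > (rem.length : Int)
        · -- more additional fields needed than remain
          rw [if_neg hlt, if_pos (Or.inr (by push_cast; omega))]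
          by_cases hremnil : rem = []
          · rw [if_neg (fun h => h.2 hremnil), if_neg (by omega : ¬ s - (q.length : Int) = 0)]
          · rw [if_pos ⟨by omega, hremnil⟩,
              PySem.List.combinations_eq_nil_of_length_lt rem (by omega)]
            rfl
        · rw [if_neg hlt,
            if_neg (by push_cast; omega : ¬ (s - (q.length : Int) < 0 ∨ s - (q.length : Int) ≥ ((rem.length + 1 : Nat) : Int))),
            pvTable_getD rem (s - (q.length : Int)).toNat (by omega)]
          by_cases hadd : s - (q.length : Int) = 0
          · rw [if_neg (by omega), if_pos hadd, hadd]
            simp only [Int.toNat_zero, PySem.List.combinations_zero, List.foldl_cons,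
              List.foldl_nil, List.append_nil]
          · have hremnil : rem ≠ [] := by
              intro h
              rw [h] at hskip
              simp only [List.length_nil, Int.natCast_zero] at hskip
              omega
            rw [if_pos ⟨by omega, hremnil⟩]
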